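-- pv_equiv track=rewrite | github.com/BVernon9/fm-position-rating-calculator | PosCalc.py | _plays_target
-- ===== SOURCE A (Python) =====
-- def _plays_target(roles, target: str) -> bool:
--     RL = {"R","L"}
--     if target == "GK":
--         return any(b == "GK" for b,_ in roles)
--     if target == "CB":
--         # Only D with explicit central letter (C present)
--         return any(b == "D" and ("C" in letters) for b,letters in roles)
--     if target == "FB":
--         # D or WB with R/L (full-backs/wing-backs only)
--         return any((b in {"D","WB"}) and (letters & RL) for b,letters in roles)
--     if target == "DM":
--         return any(b == "DM" for b,_ in roles)
--     if target == "CM":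
--         # M with central letter (C). If M has no letters at all, treat as central.
--         return any(b == "M" and (("C" in letters) or (len(letters) == 0)) for b,letters in roles)
--     if target == "AM":
--         # AMC only (central); *not* AML/AMR
--         return any(b == "AM" and (("C" in letters) or (len(letters) == 0)) for b,letters in roles)
--     if target == "W":
--         # True wingers (W) or wide AM/M (R/L)
--         return any(
--             b == "W" or ((b in {"AM","M"}) and (letters & RL))
--             for b,letters in roles
--         )
--     if target == "ST":
--         return any(b == "ST" for b,_ in roles)
--     return False
-- ===== SOURCE B (Python) =====
-- def _role_targets(b, letters):
--     # all target positions this single role qualifies for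
--     wide = "R" in letters or "L" in letters
--     central = "C" in letters or len(letters) == 0
--     t = []
--     if b == "GK":
--         t.append("GK")
--     if b == "D" and "C" in letters:
--         t.append("CB")
--     if b in ("D", "WB") and wide:
--         t.append("FB")
--     if b == "DM":
--         t.append("DM")
--     if b == "M" and central:
--         t.append("CM")
--     if b == "AM" and central:
--         t.append("AM")
--     if b == "W" or (b in ("AM", "M") and wide):
--         t.append("W")
--     if b == "ST":
--         t.append("ST")
--     return t
--
-- def _plays_target(roles, target: str) -> bool:
--     return any(target in _role_targets(b, letters) for b, letters in roles)
-- ===== Notes on version B (the rewrite author's own statement) =====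
-- stated objective: alternative
-- what changed: Inverted the decomposition: instead of branching on the target and scanning roles with a target-specific predicate, B maps each role to the full list of target positions it qualifies for via a first-class helper and asks whether any role's target list contains the target.
import Mathlib
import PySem

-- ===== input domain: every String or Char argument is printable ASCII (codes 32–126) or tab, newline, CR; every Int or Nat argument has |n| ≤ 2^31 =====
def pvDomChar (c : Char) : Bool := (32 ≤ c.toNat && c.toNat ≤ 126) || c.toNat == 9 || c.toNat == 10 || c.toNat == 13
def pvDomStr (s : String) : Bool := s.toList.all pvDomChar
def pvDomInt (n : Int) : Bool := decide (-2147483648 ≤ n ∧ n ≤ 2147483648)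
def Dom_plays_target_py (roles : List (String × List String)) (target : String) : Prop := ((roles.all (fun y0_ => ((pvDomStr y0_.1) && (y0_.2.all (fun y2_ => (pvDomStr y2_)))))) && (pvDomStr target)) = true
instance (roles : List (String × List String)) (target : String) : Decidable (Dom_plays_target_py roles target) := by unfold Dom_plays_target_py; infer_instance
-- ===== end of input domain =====

-- B inverts A's decomposition: a helper maps one role to the list of targets it plays, then any-membership; same cost.

-- ===== PORT A =====
-- literal transliteration of A's target-branching any-scans; 'letters & RL' (nonempty set
-- intersection truthiness) is ported as 'some letter equals "R" or "L"'.
def plays_target_py (roles : List (String × List String)) (target : String) : Bool :=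
  if target == "GK" then roles.any (fun r => r.1 == "GK")
  else if target == "CB" then roles.any (fun r => r.1 == "D" && r.2.contains "C")
  else if target == "FB" then roles.any (fun r => (r.1 == "D" || r.1 == "WB") && r.2.any (fun l => l == "R" || l == "L"))
  else if target == "DM" then roles.any (fun r => r.1 == "DM")
  else if target == "CM" then roles.any (fun r => r.1 == "M" && (r.2.contains "C" || r.2.length == 0))
  else if target == "AM" then roles.any (fun r => r.1 == "AM" && (r.2.contains "C" || r.2.length == 0))
  else if target == "W" then roles.any (fun r => r.1 == "W" || ((r.1 == "AM" || r.1 == "M") && r.2.any (fun l => l == "R" || l == "L")))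
  else if target == "ST" then roles.any (fun r => r.1 == "ST")
  else false

-- ===== PORT B =====
-- B's helper: the list of target positions one role (b, letters) qualifies for.
def roleTargets (b : String) (letters : List String) : List String :=
  let wide := letters.contains "R" || letters.contains "L"
  let central := letters.contains "C" || letters.length == 0
  (if b == "GK" then ["GK"] else []) ++
  (if b == "D" && letters.contains "C" then ["CB"] else []) ++
  (if (b == "D" || b == "WB") && wide then ["FB"] else []) ++
  (if b == "DM" then ["DM"] else []) ++
  (if b == "M" && central then ["CM"] else []) ++
  (if b == "AM" && central then ["AM"] else []) ++
  (if b == "W" || ((b == "AM" || b == "M") && wide) then ["W"] else []) ++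
  (if b == "ST" then ["ST"] else [])

def plays_target_py_alt (roles : List (String × List String)) (target : String) : Bool :=
  roles.any (fun r => (roleTargets r.1 r.2).contains target)

-- ===== PRECONDITION & SPEC =====
def Spec_plays_target_py (roles : List (String × List String)) (target : String) (out : Bool) : Prop := out = plays_target_py_alt roles target
instance (roles : List (String × List String)) (target : String) (out : Bool) : Decidable (Spec_plays_target_py roles target out) := by unfold Spec_plays_target_py; infer_instance

-- ===== CLAIM (what is proved, stated in full; the proofs are below) =====
def Claim_equal_plays_target_py : Prop := ∀ (roles : List (String × List String)) (target : String), Dom_plays_target_py roles target → Spec_plays_target_py roles target (plays_target_py roles target)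

-- ===== LEMMAS AND PROOFS =====

theorem contains_if_singleton (c : Bool) (a t : String) :
    (if c then [a] else ([] : List String)).contains t = (c && (t == a)) := by
  cases c <;> simp [Bool.beq_eq_decide_eq]

theorem roleTargets_contains (b : String) (l : List String) (t : String) :
    (roleTargets b l).contains t =
      ((b == "GK") && (t == "GK") ||
       (b == "D" && l.contains "C") && (t == "CB") ||
       ((b == "D" || b == "WB") && (l.contains "R" || l.contains "L")) && (t == "FB") ||
       (b == "DM") && (t == "DM") ||
       (b == "M" && (l.contains "C" || l.length == 0)) && (t == "CM") ||
       (b == "AM" && (l.contains "C" || l.length == 0)) && (t == "AM") ||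
       (b == "W" || ((b == "AM" || b == "M") && (l.contains "R" || l.contains "L"))) && (t == "W") ||
       (b == "ST") && (t == "ST")) := by
  simp only [roleTargets, List.contains_append, contains_if_singleton, Bool.or_assoc]

theorem any_contains (l : List String) :
    l.any (fun x => x == "R" || x == "L") = (l.contains "R" || l.contains "L") := by
  induction l with
  | nil => rfl
  | cons h t ih =>
      simp only [List.any_cons, List.contains_cons, ih]
      by_cases h1 : h = "R"
      · subst h1; simp
      · by_cases h2 : h = "L"
        · subst h2; simp
        · simp [Bool.beq_eq_decide_eq, h1, h2, Ne.symm h1, Ne.symm h2]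

theorem plays_target_py_spec : Claim_equal_plays_target_py := by
  intro roles target _
  unfold Spec_plays_target_py plays_target_py plays_target_py_alt
  split_ifs with h1 h2 h3 h4 h5 h6 h7 h8
  · simp only [beq_iff_eq] at h1; subst h1
    simp only [roleTargets_contains]; simp
  · simp only [beq_iff_eq] at h2; subst h2
    simp only [roleTargets_contains]; simp
  · simp only [beq_iff_eq] at h3; subst h3
    simp only [roleTargets_contains]; simp [any_contains]
  · simp only [beq_iff_eq] at h4; subst h4
    simp only [roleTargets_contains]; simp
  · simp only [beq_iff_eq] at h5; subst h5
    simp only [roleTargets_contains]; simp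
  · simp only [beq_iff_eq] at h6; subst h6
    simp only [roleTargets_contains]; simp
  · simp only [beq_iff_eq] at h7; subst h7
    simp only [roleTargets_contains]; simp [any_contains]
  · simp only [beq_iff_eq] at h8; subst h8
    simp only [roleTargets_contains]; simp
  · symm
    simp only [List.any_eq_false, roleTargets_contains]
    intro r _
    simp_all

-- ===== VERDICT (by name: the statement is the Claim_ definition above) =====
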